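-- pv_equiv track=rewrite | github.com/swapnil1518/My-Python-Projects | MinsweeperGame.py | create_minefeild
-- ===== SOURCE A (Python) =====
-- def create_minefeild(dim, minfeild_input):
--     minefeild = []
--     game_view = []
--     for row_string in minfeild_input.split(','):
--         row = []
--         game_view_row = []
--         for cells in row_string:
--             row.append(cells)
--             game_view_row.append('x')
--         minefeild.append(row)
--         game_view.append(game_view_row)
--     return minefeild, game_view
-- ===== SOURCE B (Python) =====
-- def create_minefeild(dim, minfeild_input):
--     # Single pass over the raw characters: a comma starts a new row in both
--     # grids, any other character is appended to the current last row.
--     minefeild = [[]]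
--     game_view = [[]]
--     for c in minfeild_input:
--         if c == ',':
--             minefeild.append([])
--             game_view.append([])
--         else:
--             minefeild[-1].append(c)
--             game_view[-1].append('x')
--     return minefeild, game_view
-- ===== Notes on version B (the rewrite author's own statement) =====
-- stated objective: alternative
-- what changed: Replaces split-then-nested-loops with a single-pass character state machine over the raw string: no split call, one flat loop that starts new rows in both grids at each comma and otherwise appends the character (and an 'x') to the current last row.
import Mathlib
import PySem

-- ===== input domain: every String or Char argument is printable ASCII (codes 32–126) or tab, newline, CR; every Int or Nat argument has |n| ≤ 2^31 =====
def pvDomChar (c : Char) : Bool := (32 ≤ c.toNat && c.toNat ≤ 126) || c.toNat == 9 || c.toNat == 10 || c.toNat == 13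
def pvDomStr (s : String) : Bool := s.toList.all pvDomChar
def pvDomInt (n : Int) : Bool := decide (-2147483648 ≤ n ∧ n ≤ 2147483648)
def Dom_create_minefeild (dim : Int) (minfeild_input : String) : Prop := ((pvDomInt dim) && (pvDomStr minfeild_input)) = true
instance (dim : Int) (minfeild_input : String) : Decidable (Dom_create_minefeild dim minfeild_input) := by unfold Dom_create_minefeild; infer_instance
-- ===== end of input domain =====

-- B replaces A's split-then-nested-loops with a single-pass character state machine
-- (no split: one flat loop, a comma starts fresh rows, any other character is appended
-- to the current last row of both grids).  Objective: alternative decomposition.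

-- ===== PORT A =====
-- literal transliteration of A: outer fold over the comma-split rows; inner fold over
-- each row's characters appending to `row` and `game_view_row`; both appended to the grids.
def create_minefeild (dim : Int) (minfeild_input : String) : List (List String) × List (List String) :=
  (PySem.Chars.splitOn minfeild_input.toList [',']).foldl
    (fun (acc : List (List String) × List (List String)) row_string =>
      let inner :=
        row_string.foldl
          (fun (p : List String × List String) cells =>
            (p.1 ++ [String.singleton cells], p.2 ++ ["x"]))
          ([], [])
      (acc.1 ++ [inner.1], acc.2 ++ [inner.2]))
    ([], [])

-- ===== PORT B =====
-- `xss[-1].append(x)` of Source B: append x to the last row (xss is never empty in B).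
def pvAppendLast : List (List String) → String → List (List String)
  | [], _ => []
  | [r], x => [r ++ [x]]
  | r :: rest, x => r :: pvAppendLast rest x

-- literal transliteration of B: one fold over the raw characters, starting from ([[]], [[]]).
def create_minefeild_alt (dim : Int) (minfeild_input : String) : List (List String) × List (List String) :=
  minfeild_input.toList.foldl
    (fun (acc : List (List String) × List (List String)) c =>
      if c = ',' then (acc.1 ++ [[]], acc.2 ++ [[]])
      else (pvAppendLast acc.1 (String.singleton c), pvAppendLast acc.2 "x"))
    ([[]], [[]])

-- ===== PRECONDITION & SPEC =====
def Spec_create_minefeild (dim : Int) (minfeild_input : String) (out : List (List String) × List (List String)) : Prop := out = create_minefeild_alt dim minfeild_input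
instance (dim : Int) (minfeild_input : String) (out : List (List String) × List (List String)) : Decidable (Spec_create_minefeild dim minfeild_input out) := by unfold Spec_create_minefeild; infer_instance

-- ===== CLAIM (what is proved, stated in full; the proofs are below) =====
def Claim_equal_create_minefeild : Prop := ∀ (dim : Int) (minfeild_input : String), Dom_create_minefeild dim minfeild_input → Spec_create_minefeild dim minfeild_input (create_minefeild dim minfeild_input)

-- ===== LEMMAS AND PROOFS =====

-- simple structural recursion equivalent to splitOn · [','], used as the common spec
def pvSos : List Char → List (List Char)
  | [] => [[]]
  | c :: cs =>
    if c = ',' then [] :: pvSos cs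
    else
      match pvSos cs with
      | [] => [[c]]
      | h :: t => (c :: h) :: t

theorem pvSos_ne_nil (cs : List Char) : pvSos cs ≠ [] := by
  cases cs with
  | nil => simp [pvSos]
  | cons c cs =>
    simp only [pvSos]
    split
    · simp
    · split <;> simp

theorem pv_go_eq (l : List Char) : ∀ (fuel : Nat), l.length ≤ fuel → ∀ (cur : List Char) (acc : List (List Char)),
    PySem.Chars.splitOn.go [','] fuel l cur acc
      = acc.reverse ++ (match pvSos l with
          | [] => [cur.reverse]
          | h :: t => (cur.reverse ++ h) :: t) := by
  induction l with
  | nil =>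
    intro fuel _ cur acc
    cases fuel <;> simp [PySem.Chars.splitOn.go, pvSos]
  | cons c rest ih =>
    intro fuel hf cur acc
    cases fuel with
    | zero => simp at hf
    | succ f =>
      have hf' : rest.length ≤ f := by simpa using hf
      by_cases hc : c = ','
      · subst hc
        have hpre : [','].isPrefixOf (',' :: rest) = true := by simp [List.isPrefixOf]
        rw [PySem.Chars.splitOn.go, if_pos hpre]
        simp only [List.length_singleton, List.drop_one, List.tail_cons]
        rw [ih f hf' [] (cur.reverse :: acc)]
        have hne := pvSos_ne_nil rest
        cases hsos : pvSos rest with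
        | nil => exact absurd hsos hne
        | cons h t => simp [pvSos, hsos]
      · have hpre : ¬ ([','].isPrefixOf (c :: rest) = true) := by
          simp [List.isPrefixOf]; exact fun h => hc h.symm
        rw [PySem.Chars.splitOn.go, if_neg hpre]
        rw [ih f hf' (c :: cur) acc]
        have hne := pvSos_ne_nil rest
        cases hsos : pvSos rest with
        | nil => exact absurd hsos hne
        | cons h t => simp [pvSos, hsos, hc]

theorem pv_splitOn_eq_sos (cs : List Char) : PySem.Chars.splitOn cs [','] = pvSos cs := by
  unfold PySem.Chars.splitOn
  rw [pv_go_eq cs (cs.length + 1) (by omega) [] []]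
  have hne := pvSos_ne_nil cs
  cases hsos : pvSos cs with
  | nil => exact absurd hsos hne
  | cons h t => simp

-- A's inner character loop produces the mapped row and a same-length 'x' row.
theorem pv_inner_eq (cs : List Char) (a b : List String) :
    cs.foldl (fun (p : List String × List String) c =>
        (p.1 ++ [String.singleton c], p.2 ++ ["x"])) (a, b)
      = (a ++ cs.map String.singleton, b ++ List.replicate cs.length "x") := by
  induction cs generalizing a b with
  | nil => simp
  | cons c cs ih =>
    simp only [List.foldl_cons, ih, List.map_cons, List.length_cons]
    refine Prod.ext ?_ ?_ <;> simp [List.replicate_succ]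

-- A's outer loop (with the inner loop's value substituted) maps over the rows.
theorem pv_outer_eq (rows : List (List Char)) (m g : List (List String)) :
    rows.foldl
      (fun (acc : List (List String) × List (List String)) row_string =>
        (acc.1 ++ [row_string.map String.singleton],
         acc.2 ++ [List.replicate row_string.length "x"]))
      (m, g)
    = (m ++ rows.map (fun r => r.map String.singleton),
       g ++ rows.map (fun r => List.replicate r.length "x")) := by
  induction rows generalizing m g with
  | nil => simp
  | cons r rs ih => simp [List.foldl_cons, ih]

theorem pvAppendLast_snoc (m : List (List String)) (r : List String) (x : String) :
    pvAppendLast (m ++ [r]) x = m ++ [r ++ [x]] := by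
  induction m with
  | nil => simp [pvAppendLast]
  | cons a m ih =>
    have hcons : ∀ (l : List (List String)), l ≠ [] →
        pvAppendLast (a :: l) x = a :: pvAppendLast l x := by
      intro l hl; cases l with
      | nil => exact absurd rfl hl
      | cons b t => rfl
    rw [List.cons_append, hcons (m ++ [r]) (by simp), ih]; simp

-- B's single character fold, characterized against pvSos.
theorem pv_B_eq (cs : List Char) : ∀ (m g : List (List String)) (r v : List String),
    cs.foldl
      (fun (acc : List (List String) × List (List String)) c =>
        if c = ',' then (acc.1 ++ [[]], acc.2 ++ [[]])
        else (pvAppendLast acc.1 (String.singleton c), pvAppendLast acc.2 "x"))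
      (m ++ [r], g ++ [v])
    = (m ++ (match pvSos cs with
        | [] => [r]
        | h :: t => (r ++ h.map String.singleton) :: t.map (fun q => q.map String.singleton)),
       g ++ (match pvSos cs with
        | [] => [v]
        | h :: t => (v ++ List.replicate h.length "x") :: t.map (fun q => List.replicate q.length "x"))) := by
  induction cs with
  | nil => intro m g r v; simp [pvSos]
  | cons c cs ih =>
    intro m g r v
    have hne := pvSos_ne_nil cs
    by_cases hc : c = ','
    · subst hc
      rw [List.foldl_cons, if_pos rfl]
      have hih := ih (m ++ [r]) (g ++ [v]) [] []
      cases hsos : pvSos cs with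
      | nil => exact absurd hsos hne
      | cons h t =>
        rw [hsos] at hih
        simp only [pvSos, hsos]
        simp only [List.append_assoc] at hih ⊢
        simpa using hih
    · simp only [List.foldl_cons, if_neg hc]
      rw [pvAppendLast_snoc, pvAppendLast_snoc, ih]
      cases hsos : pvSos cs with
      | nil => exact absurd hsos hne
      | cons h t => simp [pvSos, hsos, hc, List.replicate_succ]

-- ===== VERDICT (by name: the statement is the Claim_ definition above) =====
theorem create_minefeild_spec : Claim_equal_create_minefeild := by
  intro dim s _
  unfold Spec_create_minefeild create_minefeild create_minefeild_alt
  have hf :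
      (fun (acc : List (List String) × List (List String)) (row_string : List Char) =>
        let inner :=
          row_string.foldl
            (fun (p : List String × List String) cells =>
              (p.1 ++ [String.singleton cells], p.2 ++ ["x"]))
            ([], [])
        (acc.1 ++ [inner.1], acc.2 ++ [inner.2]))
      = (fun (acc : List (List String) × List (List String)) row_string =>
          (acc.1 ++ [row_string.map String.singleton],
           acc.2 ++ [List.replicate row_string.length "x"])) := by
    funext acc row
    simp [pv_inner_eq]
  rw [hf, pv_splitOn_eq_sos, pv_outer_eq]
  have hB := pv_B_eq s.toList [] [] [] []
  simp only [List.nil_append] at hB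
  rw [hB]
  have hne := pvSos_ne_nil s.toList
  cases hsos : pvSos s.toList with
  | nil => exact absurd hsos hne
  | cons h t => simp
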